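-- pv_equiv track=rewrite | github.com/smoles92/DublinBus_PredictiveWebApp | summerProject/dublinbusjourney/dublinbuspredict/Algorithms/time_date.py | src_dest_list
-- ===== SOURCE A (Python) =====
-- def src_dest_list(rows, source, dest):
--     stops = []
--     found = False
--     for i in rows:
--         if str(i[1]) == str(source):
--             found = True
--         if found:
--             stops.append([i[1], i[0], i[3], i[4]])
--         if str(i[1]) == str(dest):
--                 break
--     return stops
-- ===== SOURCE B (Python) =====
-- def src_dest_list(rows, source, dest):
--     end = next((i for i, r in enumerate(rows) if str(r[1]) == str(dest)), len(rows))
--     start = next((i for i, r in enumerate(rows[:end + 1]) if str(r[1]) == str(source)), None)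
--     if start is None:
--         return []
--     return [[r[1], r[0], r[3], r[4]] for r in rows[start:end + 1]]
-- ===== Notes on version B (the rewrite author's own statement) =====
-- stated objective: alternative
-- what changed: B computes the two boundaries up front (first dest index, then first source index within that prefix) and maps a row projection over the resulting slice, replacing A's flag-driven single-pass accumulation.
import Mathlib
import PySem

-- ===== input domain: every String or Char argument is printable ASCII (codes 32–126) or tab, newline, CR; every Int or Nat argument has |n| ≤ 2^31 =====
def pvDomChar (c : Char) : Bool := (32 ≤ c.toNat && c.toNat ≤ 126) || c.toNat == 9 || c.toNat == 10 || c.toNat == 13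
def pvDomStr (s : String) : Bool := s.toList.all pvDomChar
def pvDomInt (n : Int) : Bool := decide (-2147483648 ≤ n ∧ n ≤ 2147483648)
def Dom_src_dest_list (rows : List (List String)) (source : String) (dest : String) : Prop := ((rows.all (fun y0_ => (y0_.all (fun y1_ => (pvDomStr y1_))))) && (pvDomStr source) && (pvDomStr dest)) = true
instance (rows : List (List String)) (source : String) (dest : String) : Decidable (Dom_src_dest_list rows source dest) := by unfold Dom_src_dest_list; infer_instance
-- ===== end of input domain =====

-- ===== PORT A =====
-- B computes the slice boundaries up front and maps over the slice; A accumulates with a flag. Objective: alternative decomposition, same cost.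
-- row projection [i[1], i[0], i[3], i[4]] (rows inside Pre_ have length >= 5, so getD never defaults there)
def pvMkRow (i : List String) : List String :=
  [i.getD 1 "", i.getD 0 "", i.getD 3 "", i.getD 4 ""]

-- the for-loop of A: state = (found, stops); break on dest
def pvAGo (source dest : String) : List (List String) → Bool → List (List String) → List (List String)
  | [], _, stops => stops
  | i :: rest, found, stops =>
    let found := found || (i.getD 1 "" == source)
    let stops := if found then stops ++ [pvMkRow i] else stops
    if i.getD 1 "" == dest then stops else pvAGo source dest rest found stops

def src_dest_list (rows : List (List String)) (source : String) (dest : String) : List (List String) :=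
  pvAGo source dest rows false []

-- ===== PORT B =====
-- port of next((i for i, r in enumerate(xs) if str(r[1]) == t), default) from Source B
def pvFirstIdx (t : String) : List (List String) → Option Nat
  | [] => none
  | r :: rest => if r.getD 1 "" == t then some 0 else (pvFirstIdx t rest).map (· + 1)

def src_dest_list_alt (rows : List (List String)) (source : String) (dest : String) : List (List String) :=
  let e := (pvFirstIdx dest rows).getD rows.length
  match pvFirstIdx source (rows.take (e + 1)) with
  | none => []
  | some s => ((rows.take (e + 1)).drop s).map pvMkRow

-- ===== PRECONDITION & SPEC =====
-- Pre_ is exactly the inputs on which Python A returns: every row actually scanned (up to and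
-- including the first dest row) has at least 2 fields, and every row in the collected segment
-- (from the first source row within that prefix) has at least 5 fields; otherwise A raises IndexError.
def Pre_src_dest_list (rows : List (List String)) (source : String) (dest : String) : Prop :=
  let e := rows.findIdx (fun r => decide (r.length < 2) || (r.getD 1 "" == dest))
  let p := rows.take (e + 1)
  (∀ r ∈ p, 2 ≤ r.length) ∧
    (∀ r ∈ p.drop (p.findIdx (fun r => r.getD 1 "" == source)), 5 ≤ r.length)

instance (rows : List (List String)) (source : String) (dest : String) : Decidable (Pre_src_dest_list rows source dest) := by
  unfold Pre_src_dest_list; infer_instance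

def pvWitness_src_dest_list : List (List String) × String × String :=
  ([["1", "A", "z", "08:00", "08:05"], ["2", "B", "z", "08:05", "08:10"]], "A", "B")

def Spec_src_dest_list (rows : List (List String)) (source : String) (dest : String) (out : List (List String)) : Prop := out = src_dest_list_alt rows source dest
instance (rows : List (List String)) (source : String) (dest : String) (out : List (List String)) : Decidable (Spec_src_dest_list rows source dest out) := by unfold Spec_src_dest_list; infer_instance

-- ===== CLAIM (what is proved, stated in full; the proofs are below) =====
def Claim_equal_src_dest_list : Prop := ∀ (rows : List (List String)) (source : String) (dest : String), Dom_src_dest_list rows source dest → Pre_src_dest_list rows source dest → Spec_src_dest_list rows source dest (src_dest_list rows source dest)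

-- ===== LEMMAS AND PROOFS =====

-- once found, A collects every row up to and including the first dest row (or to the end)
theorem pvAGo_found (source dest : String) (l : List (List String)) (stops : List (List String)) :
    pvAGo source dest l true stops
      = stops ++ (l.take (((pvFirstIdx dest l).getD l.length) + 1)).map pvMkRow := by
  induction l generalizing stops with
  | nil => simp [pvAGo, pvFirstIdx]
  | cons i rest ih =>
    by_cases hd : i[1]?.getD "" = dest
    · simp [pvAGo, pvFirstIdx, hd]
    · cases he : pvFirstIdx dest rest with
      | none =>
        simp [pvAGo, pvFirstIdx, beq_iff_eq, hd, he, ih, List.take_of_length_le]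
      | some e' =>
        simp [pvAGo, pvFirstIdx, beq_iff_eq, hd, he, ih]

theorem pvMain (source dest : String) (rows : List (List String)) :
    pvAGo source dest rows false [] = src_dest_list_alt rows source dest := by
  induction rows with
  | nil => simp [pvAGo, src_dest_list_alt, pvFirstIdx]
  | cons i rest ih =>
    by_cases hs : i[1]?.getD "" = source
    · -- source found at the head
      by_cases hd : i[1]?.getD "" = dest
      · have hsd : source = dest := hs.symm.trans hd
        simp [pvAGo, src_dest_list_alt, pvFirstIdx, hs, hsd]
      · have hsd : ¬ source = dest := fun h => hd (hs.trans h)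
        cases he : pvFirstIdx dest rest with
        | none =>
          simp [pvAGo, src_dest_list_alt, pvFirstIdx, hs, hd, hsd, he, pvAGo_found,
            List.take_of_length_le]
        | some e' =>
          simp [pvAGo, src_dest_list_alt, pvFirstIdx, hs, hd, hsd, he, pvAGo_found]
    · by_cases hd : i[1]?.getD "" = dest
      · simp [pvAGo, src_dest_list_alt, pvFirstIdx, beq_iff_eq, hs, hd]
        split_ifs with h
        · exact absurd (hd.trans h) hs
        · simp [pvFirstIdx, hs]
      · -- head matches neither; both sides reduce to the tail
        have hbs : (i[1]?.getD "" == source) = false := beq_eq_false_iff_ne.mpr hs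
        have hrec : pvAGo source dest (i :: rest) false [] = pvAGo source dest rest false [] := by
          simp [pvAGo, hbs, hd]
        rw [hrec, ih]
        unfold src_dest_list_alt
        cases he : pvFirstIdx dest rest with
        | none =>
          have hR : rest.take (rest.length + 1) = rest := List.take_of_length_le (by omega)
          simp [pvFirstIdx, hs, hd, he, hR]
          cases pvFirstIdx source rest <;> simp
        | some e' =>
          simp [pvFirstIdx, hs, hd, he]
          cases pvFirstIdx source (rest.take (e' + 1)) <;> simp

-- ===== VERDICT (by name: the statement is the Claim_ definition above) =====
theorem src_dest_list_spec : Claim_equal_src_dest_list := by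
  intro rows source dest _ _
  unfold Spec_src_dest_list src_dest_list
  exact pvMain source dest rows
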